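-- pv_equiv track=rewrite | github.com/gkaggarwal/nlp | ass2/decipher.py | split_list_char
-- ===== SOURCE A (Python) =====
-- def split_list_char(src):
--     dest = []
--     for sent in src:
--         temp = []
--         for word in sent:
--             for c in word:
--                 if c != "\n":
--                     temp.append(c)
--         dest.append(temp)
--     return dest
-- ===== SOURCE B (Python) =====
-- def split_list_char(src):
--     # Stage 1: flatten all sentences into one big string, recording where each sentence ends.
--     big = ""
--     ends = []
--     for sent in src:
--         big += "".join(sent)
--         ends.append(len(big))
--     # Stage 2: carve the big string back into per-sentence slices, dropping newlines.
--     dest = []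
--     start = 0
--     for end in ends:
--         dest.append([c for c in big[start:end] if c != "\n"])
--         start = end
--     return dest
-- ===== Notes on version B (the rewrite author's own statement) =====
-- stated objective: alternative
-- what changed: Instead of per-sentence nested character loops, B first flattens the whole input into one big string while recording cumulative sentence end offsets, then in a second pass carves that string back into per-sentence slices and filters newlines from each slice.
import Mathlib
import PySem

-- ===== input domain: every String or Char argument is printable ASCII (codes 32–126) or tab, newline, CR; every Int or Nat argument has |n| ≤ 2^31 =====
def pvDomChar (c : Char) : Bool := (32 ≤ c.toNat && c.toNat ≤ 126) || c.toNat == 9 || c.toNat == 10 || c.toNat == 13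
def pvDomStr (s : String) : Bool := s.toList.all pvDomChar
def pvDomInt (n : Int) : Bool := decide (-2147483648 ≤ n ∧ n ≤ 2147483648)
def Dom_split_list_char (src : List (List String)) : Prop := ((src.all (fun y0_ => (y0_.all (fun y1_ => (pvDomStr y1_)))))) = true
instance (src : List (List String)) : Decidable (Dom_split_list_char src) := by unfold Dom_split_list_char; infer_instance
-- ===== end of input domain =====

-- B replaces A's per-sentence nested character loops by a two-stage strategy: flatten everything
-- into one big character sequence while recording cumulative sentence end offsets, then carve it
-- back into per-sentence slices and filter newlines from each slice (objective: alternative).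

-- ===== PORT A =====
-- A: nested loops, appending each non-newline character (as a 1-char string) to temp.
def split_list_char (src : List (List String)) : List (List String) :=
  src.foldl (fun dest sent =>
    dest ++ [sent.foldl (fun temp word =>
      word.toList.foldl (fun temp c =>
        if c ≠ '\n' then temp ++ [String.ofList [c]] else temp) temp) []]) []

-- ===== PORT B =====
-- B, stage 1: big += "".join(sent); ends.append(len(big)).  Python string concatenation is
-- ported exactly as List Char concatenation of the joined sentence's characters.
-- B, stage 2: for each recorded end, slice big[start:end] and keep the non-newline characters
-- as 1-char strings; start = end.
def split_list_char_alt (src : List (List String)) : List (List String) :=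
  let s1 := src.foldl (fun (p : List Char × List Nat) sent =>
      let b := p.1 ++ (PySem.Str.join "" sent).toList
      (b, p.2 ++ [b.length])) ([], [])
  (s1.2.foldl (fun (q : Nat × List (List String)) e =>
      (e, q.2 ++ [((PySem.List.slice s1.1 (some (q.1 : Int)) (some (e : Int))).filter
          (fun c => c ≠ '\n')).map (fun c => String.ofList [c])])) (0, ([] : List (List String)))).2

-- ===== PRECONDITION & SPEC =====
def Spec_split_list_char (src : List (List String)) (out : List (List String)) : Prop := out = split_list_char_alt src
instance (src : List (List String)) (out : List (List String)) : Decidable (Spec_split_list_char src out) := by unfold Spec_split_list_char; infer_instance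

-- ===== CLAIM (what is proved, stated in full; the proofs are below) =====
def Claim_equal_split_list_char : Prop := ∀ (src : List (List String)), Dom_split_list_char src → Spec_split_list_char src (split_list_char src)

-- ===== LEMMAS AND PROOFS =====

-- the characters of one sentence, and its cleaned per-sentence result
def pvChars (sent : List String) : List Char := (PySem.Str.join "" sent).toList
def pvSent (sent : List String) : List String :=
  ((pvChars sent).filter (fun c => c ≠ '\n')).map (fun c => String.ofList [c])

theorem join_nil_flatten (ls : List (List Char)) :
    PySem.Chars.join [] ls = ls.flatten := by
  induction ls with
  | nil => simp [PySem.Chars.join, List.intercalate]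
  | cons x xs ih =>
    cases xs with
    | nil => simp [PySem.Chars.join, List.intercalate]
    | cons y ys =>
      simp only [PySem.Chars.join, List.intercalate] at ih ⊢
      simp [List.intersperse] at ih ⊢
      exact ih

theorem pvChars_eq (sent : List String) :
    pvChars sent = (sent.map String.toList).flatten := by
  simp [pvChars, PySem.Str.join, join_nil_flatten]

-- A's inner char loop appends the filtered, singleton-mapped chars
theorem inner_fold (cs : List Char) (temp : List String) :
    cs.foldl (fun temp c => if c ≠ '\n' then temp ++ [String.ofList [c]] else temp) temp
      = temp ++ (cs.filter (fun c => c ≠ '\n')).map (fun c => String.ofList [c]) := by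
  induction cs generalizing temp with
  | nil => simp
  | cons c t ih =>
    rw [List.foldl_cons]
    by_cases hc : c = '\n'
    · rw [if_neg (by simp [hc]), ih]; simp [hc]
    · rw [if_pos hc, ih]; simp [hc]

theorem word_fold (sent : List String) (temp : List String) :
    sent.foldl (fun temp word =>
        word.toList.foldl (fun temp c => if c ≠ '\n' then temp ++ [String.ofList [c]] else temp) temp) temp
      = temp ++ pvSent sent := by
  rw [pvSent, pvChars_eq]
  induction sent generalizing temp with
  | nil => simp
  | cons w ws ih =>
    rw [List.foldl_cons, inner_fold, ih]
    simp [List.filter_append, List.append_assoc]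

-- A computes the per-sentence map
theorem split_list_char_eq_map (src : List (List String)) :
    split_list_char src = src.map pvSent := by
  unfold split_list_char
  suffices h : ∀ dest : List (List String),
      src.foldl (fun dest sent =>
        dest ++ [sent.foldl (fun temp word =>
          word.toList.foldl (fun temp c => if c ≠ '\n' then temp ++ [String.ofList [c]] else temp) temp) []]) dest
      = dest ++ src.map pvSent by simpa using h []
  induction src with
  | nil => simp
  | cons sent rest ih =>
    intro dest
    rw [List.foldl_cons, word_fold, ih]
    simp

-- cumulative sentence end offsets starting from n
def pvCum (n : Nat) : List (List String) → List Nat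
  | [] => []
  | s :: r => (n + (pvChars s).length) :: pvCum (n + (pvChars s).length) r

-- B's stage 1 builds the global flatten and the cumulative ends
theorem stage1_eq (src : List (List String)) (b0 : List Char) (e0 : List Nat) :
    src.foldl (fun (p : List Char × List Nat) sent =>
        let b := p.1 ++ (PySem.Str.join "" sent).toList
        (b, p.2 ++ [b.length])) (b0, e0)
      = (b0 ++ (src.map pvChars).flatten, e0 ++ pvCum b0.length src) := by
  induction src generalizing b0 e0 with
  | nil => simp [pvCum]
  | cons s r ih =>
    rw [List.foldl_cons]
    simp only
    rw [ih]
    simp [pvCum, pvChars, List.append_assoc]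

-- B's stage 2 carves the flatten back into the per-sentence results
theorem stage2_eq (src : List (List String)) (pre : List Char) (rest : List Char)
    (acc : List (List String)) :
    ((pvCum pre.length src).foldl (fun (q : Nat × List (List String)) e =>
        (e, q.2 ++ [((PySem.List.slice (pre ++ (src.map pvChars).flatten ++ rest)
            (some (q.1 : Int)) (some (e : Int))).filter
            (fun c => c ≠ '\n')).map (fun c => String.ofList [c])])) (pre.length, acc)).2
      = acc ++ src.map pvSent := by
  induction src generalizing pre acc with
  | nil => simp [pvCum]
  | cons s r ih =>
    rw [pvCum, List.foldl_cons]
    simp only [List.map_cons, List.flatten_cons, List.append_assoc]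
    have hslice : PySem.List.slice (pre ++ (pvChars s ++ ((r.map pvChars).flatten ++ rest)))
        (some ((pre.length : Nat) : Int)) (some ((pre.length + (pvChars s).length : Nat) : Int))
        = pvChars s := by
      rw [PySem.List.slice_natCast]
      simp
    rw [hslice]
    have h2 := ih (pre ++ pvChars s) (acc ++ [pvSent s])
    simp only [List.length_append, List.append_assoc, pvSent] at h2 ⊢
    rw [h2]
    simp

theorem split_list_char_alt_eq_map (src : List (List String)) :
    split_list_char_alt src = src.map pvSent := by
  unfold split_list_char_alt
  rw [stage1_eq]
  simp only [List.nil_append, List.length_nil]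
  have := stage2_eq src [] [] []
  simpa using this

-- ===== VERDICT (by name: the statement is the Claim_ definition above) =====
theorem split_list_char_spec : Claim_equal_split_list_char := by
  intro src _
  show split_list_char src = split_list_char_alt src
  rw [split_list_char_eq_map, split_list_char_alt_eq_map]
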